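-- pv_equiv track=rewrite | github.com/tmu-nlp/UniTP | data/cross/multib.py | total_fence
-- ===== SOURCE A (Python) =====
-- def total_fence(space_layer):
--     count = len(space_layer)
--     space_layer = [-1] + space_layer + [-1]
--     split_layer = []
--     for sid, (lhs, rhs) in enumerate(zip(space_layer, space_layer[1:])):
--         if lhs != rhs:
--             split_layer.append(sid)
--     return count, split_layer
-- ===== SOURCE B (Python) =====
-- def total_fence(space_layer):
--     n = len(space_layer)
--     # Stage 1: run-length decomposition -- one (value, start_index) pair per
--     # maximal run of equal values.
--     runs = []
--     for i, v in enumerate(space_layer):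
--         if not runs or runs[-1][0] != v:
--             runs.append((v, i))
--     # Stage 2: every run start is a fence, except a leading run of -1 (no fence
--     # at the left edge of a -1 run); the right edge n is a fence unless the
--     # last run is a -1 run.
--     splits = [s for v, s in runs if s != 0 or v != -1]
--     if runs and runs[-1][0] != -1:
--         splits.append(n)
--     return n, splits
-- ===== Notes on version B (the rewrite author's own statement) =====
-- stated objective: alternative
-- what changed: Replaces the pad-and-zip adjacent scan with a run-length decomposition: stage 1 builds the list of maximal runs as (value, start) pairs, stage 2 derives the fences as the run starts (dropping a leading -1 run's start) plus the right edge n unless the last run is -1.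
import Mathlib
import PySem

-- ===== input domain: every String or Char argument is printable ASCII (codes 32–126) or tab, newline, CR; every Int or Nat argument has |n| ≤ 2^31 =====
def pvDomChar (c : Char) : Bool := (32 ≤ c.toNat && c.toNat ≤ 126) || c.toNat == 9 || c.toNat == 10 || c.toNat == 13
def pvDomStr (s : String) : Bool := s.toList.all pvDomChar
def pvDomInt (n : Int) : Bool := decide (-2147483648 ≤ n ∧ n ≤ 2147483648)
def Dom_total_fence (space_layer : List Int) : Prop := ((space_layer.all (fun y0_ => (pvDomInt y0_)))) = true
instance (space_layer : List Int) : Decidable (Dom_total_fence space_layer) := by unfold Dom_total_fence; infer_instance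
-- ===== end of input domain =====

-- B replaces A's pad-and-zip adjacent scan by a run-length decomposition (maximal runs as
-- (value, start) pairs) from which the fences are derived in a second stage (objective: alternative).

-- ===== PORT A =====
-- literal port: pad with -1 on both sides, enumerate the zip of the padded list with its [1:] slice
def total_fence (space_layer : List Int) : Int × List Int :=
  let count : Int := space_layer.length
  let space : List Int := [-1] ++ space_layer ++ [-1]
  let split : List Int :=
    (PySem.List.enumerate (space.zip (PySem.List.slice space (some 1) none)) 0).foldl
      (fun acc p => if p.2.1 ≠ p.2.2 then acc ++ [p.1] else acc) []
  (count, split)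

-- ===== PORT B =====
-- literal port of Source B: build the run list, then derive the fences from it
def total_fence_alt (space_layer : List Int) : Int × List Int :=
  let n : Int := space_layer.length
  let runs : List (Int × Int) :=
    (PySem.List.enumerate space_layer 0).foldl
      (fun runs p =>
        if runs = [] ∨ (runs.getLastD (0, 0)).1 ≠ p.2 then runs ++ [(p.2, p.1)] else runs) []
  let splits : List Int :=
    (runs.filter (fun q => decide (q.2 ≠ 0) || decide (q.1 ≠ -1))).map (fun q => q.2)
  let splits : List Int :=
    if runs ≠ [] ∧ (runs.getLastD (0, 0)).1 ≠ -1 then splits ++ [n] else splits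
  (n, splits)

-- ===== PRECONDITION & SPEC =====
def Spec_total_fence (space_layer : List Int) (out : Int × List Int) : Prop := out = total_fence_alt space_layer
instance (space_layer : List Int) (out : Int × List Int) : Decidable (Spec_total_fence space_layer out) := by unfold Spec_total_fence; infer_instance

-- ===== CLAIM (what is proved, stated in full; the proofs are below) =====
def Claim_equal_total_fence : Prop := ∀ (space_layer : List Int), Dom_total_fence space_layer → Spec_total_fence space_layer (total_fence space_layer)

-- ===== LEMMAS AND PROOFS =====

/-- proof-side view of A's fence loop: walk the list remembering the previous value. -/
def fenceRec (prev : Int) (ys : List Int) (i : Int) (acc : List Int) : List Int :=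
  match ys with
  | [] => acc
  | v :: tl => fenceRec v tl (i + 1) (if prev ≠ v then acc ++ [i] else acc)

/-- proof-side view of B's run builder: the runs of `xs` given the previous value `prev`. -/
def runsOf (prev : Int) (xs : List Int) (i : Int) : List (Int × Int) :=
  match xs with
  | [] => []
  | v :: tl => if prev ≠ v then (v, i) :: runsOf v tl (i + 1) else runsOf prev tl (i + 1)

theorem foldlA_eq_fenceRec (ys : List Int) : ∀ (prev i : Int) (acc : List Int),
    (PySem.List.enumerate ((prev :: ys).zip ys) i).foldl
      (fun acc p => if p.2.1 ≠ p.2.2 then acc ++ [p.1] else acc) acc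
      = fenceRec prev ys i acc := by
  induction ys with
  | nil => intro prev i acc; simp [fenceRec, PySem.List.enumerate_nil]
  | cons v tl ih =>
    intro prev i acc
    simp only [List.zip_cons_cons, PySem.List.enumerate_cons, List.foldl_cons, fenceRec]
    exact ih v (i + 1) _

theorem fenceRec_acc (ys : List Int) : ∀ (prev i : Int) (acc : List Int),
    fenceRec prev ys i acc = acc ++ fenceRec prev ys i [] := by
  induction ys with
  | nil => intro prev i acc; simp [fenceRec]
  | cons v tl ih =>
    intro prev i acc
    simp only [fenceRec]
    rw [ih v (i + 1) (if prev ≠ v then acc ++ [i] else acc),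
        ih v (i + 1) (if prev ≠ v then [] ++ [i] else [])]
    split_ifs <;> simp

theorem fenceRec_last (ys : List Int) : ∀ (prev i : Int) (acc : List Int),
    fenceRec prev (ys ++ [-1]) i acc
      = (fenceRec prev ys i acc) ++ (if ys.getLastD prev ≠ -1 then [i + ys.length] else []) := by
  induction ys with
  | nil =>
    intro prev i acc
    simp only [List.nil_append, fenceRec, List.getLastD_nil, List.length_nil]
    split_ifs <;> simp
  | cons v tl ih =>
    intro prev i acc
    simp only [List.cons_append, fenceRec, List.getLastD_cons, ih]
    congr 2
    simp only [List.cons.injEq, List.length_cons, and_true]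
    push_cast
    ring

/-- B's fold extends a non-empty run list whose last value is `prev` by `runsOf prev t i`. -/
theorem foldlB_eq_runsOf (t : List Int) : ∀ (prev i : Int) (acc : List (Int × Int)),
    acc ≠ [] → (acc.getLastD (0, 0)).1 = prev →
    (PySem.List.enumerate t i).foldl
      (fun runs p =>
        if runs = [] ∨ (runs.getLastD (0, 0)).1 ≠ p.2 then runs ++ [(p.2, p.1)] else runs) acc
      = acc ++ runsOf prev t i := by
  induction t with
  | nil => intro prev i acc _ _; simp [runsOf, PySem.List.enumerate_nil]
  | cons v tl ih =>
    intro prev i acc hne hlast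
    simp only [PySem.List.enumerate_cons, List.foldl_cons, runsOf]
    by_cases h : prev ≠ v
    · rw [if_pos (Or.inr (hlast ▸ h))]
      rw [ih v (i + 1) (acc ++ [(v, i)]) (by simp) (by simp)]
      simp [h]
    · have hv : prev = v := not_not.mp h
      rw [if_neg (by rintro (hc | hc); exact hne hc; exact hc (hlast.trans hv))]
      rw [ih prev (i + 1) acc hne hlast]
      simp [hv]

/-- the fence indices are exactly the run starts. -/
theorem map_snd_runsOf (t : List Int) : ∀ (prev i : Int),
    (runsOf prev t i).map (fun q => q.2) = fenceRec prev t i [] := by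
  induction t with
  | nil => intro prev i; simp [runsOf, fenceRec]
  | cons v tl ih =>
    intro prev i
    simp only [runsOf, fenceRec]
    by_cases h : prev ≠ v
    · rw [if_pos h, if_pos h, List.map_cons, ih, fenceRec_acc tl v (i + 1) ([] ++ [i])]
      simp
    · rw [if_neg h, if_neg h, ih, not_not.mp h]

/-- interior runs all start at a positive index, so B's edge filter keeps them. -/
theorem filter_runsOf (t : List Int) : ∀ (prev i : Int), 1 ≤ i →
    (runsOf prev t i).filter (fun q => decide (q.2 ≠ 0) || decide (q.1 ≠ -1))
      = runsOf prev t i := by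
  induction t with
  | nil => intro prev i _; simp [runsOf]
  | cons v tl ih =>
    intro prev i hi
    simp only [runsOf]
    split_ifs with h
    · rw [List.filter_cons]
      rw [if_pos (by simp; omega)]
      rw [ih v (i + 1) (by omega)]
    · exact ih prev (i + 1) (by omega)

/-- the last run's value is the list's last value. -/
theorem last_runsOf (t : List Int) : ∀ (prev i : Int) (d : Int × Int), d.1 = prev →
    ((runsOf prev t i).getLastD d).1 = t.getLastD prev := by
  induction t with
  | nil => intro prev i d hd; simpa [runsOf] using hd
  | cons v tl ih =>
    intro prev i d hd
    simp only [runsOf, List.getLastD_cons]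
    by_cases h : prev ≠ v
    · simp only [if_pos h, List.getLastD_cons]
      exact ih v (i + 1) (v, i) rfl
    · rw [if_neg h, ih prev (i + 1) d hd, not_not.mp h]

theorem total_fence_eq (xs : List Int) : total_fence xs = total_fence_alt xs := by
  cases xs with
  | nil => decide
  | cons h t =>
    -- A's side reduced to fenceRec over the padded list
    show (_, _) = (_, _)
    simp only [PySem.List.slice_from_one]
    have hz : ([-1] ++ (h :: t) ++ [-1] : List Int)
        = (-1) :: ((h :: t) ++ [-1]) := by simp
    rw [hz]
    show (_, (PySem.List.enumerate (((-1 : Int) :: ((h :: t) ++ [-1])).zip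
        (((-1 : Int) :: ((h :: t) ++ [-1])).tail)) 0).foldl _ []) = _
    simp only [List.tail_cons]
    rw [foldlA_eq_fenceRec]
    -- B's side reduced to runsOf
    simp only [PySem.List.enumerate_cons, List.foldl_cons, true_or, if_true,
      List.nil_append, zero_add]
    rw [foldlB_eq_runsOf t h 1 [(h, 0)] (by simp) (by simp)]
    have hlast : ((((h, 0) :: runsOf h t 1)).getLastD ((0 : Int), (0 : Int))).1
        = t.getLastD h := by
      simp only [List.getLastD_cons]
      exact last_runsOf t h 1 (h, 0) rfl
    -- unfold both stages
    rw [fenceRec_last (h :: t) (-1) 0 []]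
    simp only [fenceRec]
    simp only [zero_add, List.singleton_append]
    rw [hlast, fenceRec_acc t h 1, List.filter_cons, filter_runsOf t h 1 (by omega)]
    simp only [Prod.mk.injEq, true_and, List.getLastD_cons, List.length_cons,
      List.cons_ne_nil, ne_eq, not_false_iff]
    by_cases hh : h = -1 <;> by_cases hl : t.getLastD h = -1 <;>
      simp [hh, hl, map_snd_runsOf, ne_comm] <;> split_ifs <;> simp

-- ===== VERDICT (by name: the statement is the Claim_ definition above) =====
theorem total_fence_spec : Claim_equal_total_fence := by
  intro xs _
  unfold Spec_total_fence
  exact total_fence_eq xs
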